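-- pv_equiv track=rewrite | github.com/w1ll-farmer/backgammon | Code/turn.py | calc_prime
-- ===== SOURCE A (Python) =====
-- def is_wall(point, player):
--     """Checks if a point is a wall occupied by current player
--
--     Args:
--         point (int): The pieces occupying a point on the board
--         player (int): -1 for black, 1 for white
--
--     Returns:
--         Bool: True if wall, False if not
--     """
--     if player == 1:
--         return point > player
--     else:
--         return point < player
--
-- def calc_prime(board, player):
--     prime = 0
--     max_prime = 0
--     for point in board:
--         if is_wall(point, player):
--             prime +=1
--         else:
--             if prime > max_prime: max_prime = prime
--             prime = 0
--
--     if prime > max_prime: max_prime = prime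
--     return max_prime
-- ===== SOURCE B (Python) =====
-- def is_wall(point, player):
--     if player == 1:
--         return point > player
--     else:
--         return point < player
--
-- def calc_prime(board, player):
--     s = ''.join('1' if is_wall(p, player) else '0' for p in board)
--     return max((len(run) for run in s.split('0')), default=0)
-- ===== Notes on version B (the rewrite author's own statement) =====
-- stated objective: idiomatic
-- what changed: B replaces A's counter/reset state machine by building a 0/1 mask string and taking the max length of its '0'-split runs, separating run segmentation from the max reduction.
import Mathlib
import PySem

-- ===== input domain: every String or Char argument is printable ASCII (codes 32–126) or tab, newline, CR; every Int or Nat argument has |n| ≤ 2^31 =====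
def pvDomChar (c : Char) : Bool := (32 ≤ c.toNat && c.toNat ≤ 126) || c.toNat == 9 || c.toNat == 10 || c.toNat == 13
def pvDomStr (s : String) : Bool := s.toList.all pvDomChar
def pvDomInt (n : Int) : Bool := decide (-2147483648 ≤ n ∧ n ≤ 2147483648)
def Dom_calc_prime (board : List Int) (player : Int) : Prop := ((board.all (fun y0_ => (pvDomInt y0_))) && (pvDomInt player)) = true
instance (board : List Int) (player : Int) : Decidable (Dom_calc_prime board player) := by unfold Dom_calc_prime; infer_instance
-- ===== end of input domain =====

-- B builds a 0/1 mask and takes the max length of its '0'-split runs instead of A's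
-- counter/reset state machine; same O(n) cost, a different decomposition.

-- ===== PORT A =====
def is_wall (point : Int) (player : Int) : Bool :=
  if player == 1 then point > player else point < player

-- the for loop carries state (prime, max_prime); the trailing 'if prime > max_prime' follows it
def calc_prime (board : List Int) (player : Int) : Int :=
  let st := board.foldl (fun (st : Int × Int) point =>
      if is_wall point player then (st.1 + 1, st.2)
      else (0, if st.1 > st.2 then st.1 else st.2)) (0, 0)
  if st.1 > st.2 then st.1 else st.2

-- ===== PORT B =====
-- the mask string is modelled as List Char of '1'/'0'; s.split('0') = List.splitOn '0'
-- (both yield [""] on empty input and empty pieces between adjacent separators);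
-- max(lengths, default=0) = foldl max 0 over the run lengths
def calc_prime_alt (board : List Int) (player : Int) : Int :=
  let s : List Char := board.map (fun p => if is_wall p player then '1' else '0')
  ((s.splitOn '0').map (fun run => (run.length : Int))).foldl max 0

-- ===== PRECONDITION & SPEC =====
def Spec_calc_prime (board : List Int) (player : Int) (out : Int) : Prop := out = calc_prime_alt board player
instance (board : List Int) (player : Int) (out : Int) : Decidable (Spec_calc_prime board player out) := by unfold Spec_calc_prime; infer_instance

-- ===== CLAIM (what is proved, stated in full; the proofs are below) =====
def Claim_equal_calc_prime : Prop := ∀ (board : List Int) (player : Int), Dom_calc_prime board player → Spec_calc_prime board player (calc_prime board player)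

-- ===== LEMMAS AND PROOFS =====

-- A's loop started in state (p, m) computes the max of m, the p-extended first run
-- length, and the remaining run lengths of the board's wall mask.
theorem calc_prime_loop_eq (player : Int) : ∀ (board : List Int) (p m : Int),
    (let st := board.foldl (fun (st : Int × Int) point =>
        if is_wall point player then (st.1 + 1, st.2)
        else (0, if st.1 > st.2 then st.1 else st.2)) (p, m)
     if st.1 > st.2 then st.1 else st.2)
    = (let rs := (board.map (fun q => if is_wall q player then '1' else '0')).splitOn '0'
       List.foldl max m ((p + (rs.headI.length : Int)) :: rs.tail.map (fun r => (r.length : Int))))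
    := by
  intro board
  induction board with
  | nil =>
      intro p m
      simp [List.splitOn_nil, max_def]
      omega
  | cons x bs ih =>
      intro p m
      by_cases hw : is_wall x player
      · have h := ih (p+1) m
        rcases hsp : (bs.map (fun q => if is_wall q player then '1' else '0')).splitOn '0' with _ | ⟨hd, tl⟩
        · exact absurd hsp (List.splitOnP_ne_nil _ _)
        · rw [List.splitOn] at hsp
          simp only [hsp, List.splitOn] at h
          simp only [List.foldl_cons, List.map_cons, hw, if_pos, List.splitOn,
            List.splitOnP_cons, hsp] at h ⊢
          rw [h]
          simp only [List.modifyHead, List.headI, List.tail]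
          congr 2
          push_cast [List.length_cons]
          ring
      · have h := ih 0 (if p > m then p else m)
        rcases hsp : (bs.map (fun q => if is_wall q player then '1' else '0')).splitOn '0' with _ | ⟨hd, tl⟩
        · exact absurd hsp (List.splitOnP_ne_nil _ _)
        · rw [List.splitOn] at hsp
          simp only [hsp, List.splitOn] at h
          simp only [List.foldl_cons, List.map_cons, hw, Bool.false_eq_true, if_false,
            List.splitOn, List.splitOnP_cons, hsp] at h ⊢
          rw [h]
          simp only [List.headI, List.tail]
          have : (if p > m then p else m) = max m p := by omega
          rw [this]
          norm_num

-- ===== VERDICT (by name: the statement is the Claim_ definition above) =====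
theorem calc_prime_spec : Claim_equal_calc_prime := by
  intro board player _
  unfold Spec_calc_prime calc_prime calc_prime_alt
  have h := calc_prime_loop_eq player board 0 0
  simp only at h
  rw [h]
  rcases hsp : (board.map (fun q => if is_wall q player then '1' else '0')).splitOn '0' with _ | ⟨hd, tl⟩
  · exact absurd hsp (List.splitOnP_ne_nil _ _)
  · simp [hsp]
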